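-- pv_equiv track=rewrite | github.com/ramelloperalta/Python-coursework | labs109c.py | remove_after_kth
-- ===== SOURCE A (Python) =====
-- def remove_after_kth(items, k = 1):
--     count = {}
--     result = []
--     if k == 0:
--         return []
--     for value in items:
--         if value in count:
--             count[value] += 1
--         else:
--             count[value] = 1
--         if count[value] <= k:
--             result.append(value)
--     return result
-- ===== SOURCE B (Python) =====
-- def remove_after_kth(items, k=1):
--     # Staged passes: gather each value's occurrence positions, keep the first k
--     # positions per value, then read the kept positions back in ascending order.
--     if k <= 0:
--         return []
--     pos = {}
--     for i, v in enumerate(items):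
--         pos.setdefault(v, []).append(i)
--     kept = sorted(i for idxs in pos.values() for i in idxs[:k])
--     return [items[i] for i in kept]
-- ===== Notes on version B (the rewrite author's own statement) =====
-- stated objective: alternative
-- what changed: Replaces A's single stateful count-and-emit loop by staged passes: group each value's occurrence positions into a dict, keep only each value's first k positions, sort the kept positions, and read the values back by index.
import Mathlib
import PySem

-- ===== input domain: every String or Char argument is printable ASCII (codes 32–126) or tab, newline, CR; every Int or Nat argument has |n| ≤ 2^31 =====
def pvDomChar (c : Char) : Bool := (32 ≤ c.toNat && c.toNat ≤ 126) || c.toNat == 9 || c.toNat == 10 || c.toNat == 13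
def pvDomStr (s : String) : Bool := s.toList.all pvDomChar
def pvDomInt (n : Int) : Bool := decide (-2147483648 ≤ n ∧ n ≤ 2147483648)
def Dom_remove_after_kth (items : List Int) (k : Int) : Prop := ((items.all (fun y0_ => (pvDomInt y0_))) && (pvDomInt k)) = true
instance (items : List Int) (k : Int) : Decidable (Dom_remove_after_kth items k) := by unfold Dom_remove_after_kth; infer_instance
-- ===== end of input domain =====

-- B replaces A's stateful count-and-emit single loop by staged passes: group occurrence
-- positions per value, keep each value's first k positions, sort them, read back (alternative decomposition, not faster).


-- ===== PORT A =====
def remove_after_kth (items : List Int) (k : Int) : List Int :=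
  if k = 0 then []
  else
    (items.foldl
      (fun (st : PySem.Dict Int Int × List Int) value =>
        let count :=
          if st.1.contains value then st.1.insert value (st.1.getD value 0 + 1)  -- count[value] += 1
          else st.1.insert value 1                                               -- count[value] = 1
        let result := if count.getD value 0 ≤ k then st.2 ++ [value] else st.2
        (count, result))
      (PySem.Dict.empty, [])).2

-- ===== PORT B =====
def remove_after_kth_alt (items : List Int) (k : Int) : List Int :=
  if k ≤ 0 then []
  else
    -- pos.setdefault(v, []).append(i)  ≡  pos[v] = pos.get(v, []) + [i]
    let pos := (PySem.List.enumerate items 0).foldl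
      (fun (d : PySem.Dict Int (List Int)) p => d.modify p.2 [] (· ++ [p.1]))
      PySem.Dict.empty
    let kept := PySem.List.sorted
      (pos.values.flatMap (fun idxs => PySem.List.slice idxs none (some k)))
      (fun i => i) false
    -- items[i]: i is a stored enumerate index, always in range, so the default is never used
    kept.map (fun i => (PySem.List.pyGet? items i).getD 0)

-- ===== PRECONDITION & SPEC =====
def Spec_remove_after_kth (items : List Int) (k : Int) (out : List Int) : Prop := out = remove_after_kth_alt items k
instance (items : List Int) (k : Int) (out : List Int) : Decidable (Spec_remove_after_kth items k out) := by unfold Spec_remove_after_kth; infer_instance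

-- ===== CLAIM (what is proved, stated in full; the proofs are below) =====
def Claim_equal_remove_after_kth : Prop := ∀ (items : List Int) (k : Int), Dom_remove_after_kth items k → Spec_remove_after_kth items k (remove_after_kth items k)

-- ===== LEMMAS AND PROOFS =====

-- A's dict branch always amounts to 'insert value (getD value 0 + 1)'.
theorem pv_dict_branch (d : PySem.Dict Int Int) (v : Int) :
    (if d.contains v then d.insert v (d.getD v 0 + 1) else d.insert v 1)
      = d.insert v (d.getD v 0 + 1) := by
  by_cases h : d.contains v
  · simp [h]
  · rw [if_neg (by simpa using h), PySem.Dict.getD_of_not_contains d 0 (by simpa using h)]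
    norm_num

-- A's loop invariant: the emitted list is the prefix-count filter, by reverse induction.
theorem pv_fold_inv (k : Int) (l : List Int) :
    l.foldl
      (fun (st : PySem.Dict Int Int × List Int) value =>
        let count :=
          if st.1.contains value then st.1.insert value (st.1.getD value 0 + 1)
          else st.1.insert value 1
        let result := if count.getD value 0 ≤ k then st.2 ++ [value] else st.2
        (count, result))
      (PySem.Dict.empty, [])
    = (l.foldl (fun d x => d.insert x (d.getD x 0 + 1)) PySem.Dict.empty,
       ((PySem.List.enumerate l 0).filter
          (fun p => (PySem.List.count (PySem.List.slice l none (some p.1)) p.2 : Int) < k)).map (·.2)) := by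
  induction l using List.reverseRecOn with
  | nil => simp [PySem.List.enumerate]
  | append_singleton l v ih =>
    rw [List.foldl_append, List.foldl_append, ih]
    simp only [List.foldl_cons, List.foldl_nil, pv_dict_branch, Prod.mk.injEq]
    refine ⟨trivial, ?_⟩
    · rw [PySem.List.enumerate_append]
      rw [List.filter_append, List.map_append]
      have hcongr : ∀ p ∈ PySem.List.enumerate l 0,
          (decide ((PySem.List.count (PySem.List.slice (l ++ [v]) none (some p.1)) p.2 : Int) < k))
            = (decide ((PySem.List.count (PySem.List.slice l none (some p.1)) p.2 : Int) < k)) := by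
        intro p hp
        obtain ⟨i, hi, rfl⟩ := (PySem.List.mem_enumerate_iff _ _ _).1 hp
        have h0 : (0:Int) + (i:Int) = (i:Int) := by ring
        rw [h0, PySem.List.slice_to _ (by positivity), PySem.List.slice_to _ (by positivity)]
        rw [Int.toNat_natCast, List.take_append_of_le_length (le_of_lt hi)]
      rw [List.filter_congr hcongr]
      have hget : ((l.foldl (fun d x => d.insert x (d.getD x 0 + 1)) PySem.Dict.empty).insert v
            ((l.foldl (fun d x => d.insert x (d.getD x 0 + 1)) PySem.Dict.empty).getD v 0 + 1)).getD v 0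
          = (l.count v : Int) + 1 := by
        rw [PySem.Dict.getD_insert_self, PySem.Dict.getD_foldl_insert_add_one]
        simp
      simp only [PySem.List.enumerate_nil, PySem.List.enumerate_cons, List.filter_cons,
        List.filter_nil, hget]
      have hslice : PySem.List.slice (l ++ [v]) none (some ((0:Int) + (l.length:Int))) = l := by
        have : ((0:Int) + (l.length:Int)) = ((l.length : Nat) : Int) := by ring
        rw [this, PySem.List.slice_to_natCast]; simp
      rw [hslice]
      by_cases hk : (l.count v : Int) < k
      · have : (l.count v : Int) + 1 ≤ k := by omega
        simp [hk, this]
      · have : ¬ ((l.count v : Int) + 1 ≤ k) := by omega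
        simp [hk, this, PySem.List.count]

-- B's grouping loop: pos[v] is the list of positions of v, in order.
theorem pv_bucket (items : List Int) (v : Int) :
    (((PySem.List.enumerate items 0).foldl
        (fun (d : PySem.Dict Int (List Int)) p => d.modify p.2 [] (· ++ [p.1]))
        PySem.Dict.empty).getD v [])
      = ((PySem.List.enumerate items 0).filter (fun p => p.2 == v)).map (·.1) := by
  have h : (PySem.List.enumerate items 0).foldl
        (fun (d : PySem.Dict Int (List Int)) p => d.modify p.2 [] (· ++ [p.1]))
        PySem.Dict.empty
      = ((PySem.List.enumerate items 0).map Prod.swap).foldl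
        (fun (d : PySem.Dict Int (List Int)) p => d.modify p.1 [] (· ++ [p.2]))
        PySem.Dict.empty := by
    rw [List.foldl_map]; simp
  rw [h, PySem.Dict.getD_foldl_modify_append]
  simp [List.filter_map, Function.comp_def]

-- B's grouping loop: the keys are the distinct values of items, and they are nodup.
theorem pv_keys (items : List Int) :
    ((PySem.List.enumerate items 0).foldl
        (fun (d : PySem.Dict Int (List Int)) p => d.modify p.2 [] (· ++ [p.1]))
        PySem.Dict.empty).keys = PySem.Set.ofList items := by
  rw [PySem.Dict.keys_foldl_modify_key]
  simp [PySem.Set.update, PySem.Set.ofList_eq_foldl, PySem.Dict.keys_empty,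
    PySem.List.map_snd_enumerate]

theorem pv_nodup_keys (items : List Int) :
    ((PySem.List.enumerate items 0).foldl
        (fun (d : PySem.Dict Int (List Int)) p => d.modify p.2 [] (· ++ [p.1]))
        PySem.Dict.empty).keys.Nodup := by
  exact PySem.Dict.nodup_keys_foldl_modify_key _ _ _ _ _ (by simp [PySem.Dict.keys_empty])

-- Taking the first k positions of v equals filtering by prefix count < k.
theorem pv_take (k : Int) (hk : 0 < k) (v : Int) (l : List Int) :
    (((PySem.List.enumerate l 0).filter (fun p => p.2 == v)).map (·.1)).take k.toNat
  = ((PySem.List.enumerate l 0).filter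
       (fun p => (p.2 == v) &&
         decide ((PySem.List.count (PySem.List.slice l none (some p.1)) p.2 : Int) < k))).map (·.1) := by
  induction l using List.reverseRecOn with
  | nil => simp [PySem.List.enumerate]
  | append_singleton l x ih =>
    rw [PySem.List.enumerate_append]
    have hcongr : ∀ p ∈ PySem.List.enumerate l 0,
        ((p.2 == v) && decide ((PySem.List.count (PySem.List.slice (l ++ [x]) none (some p.1)) p.2 : Int) < k))
          = ((p.2 == v) && decide ((PySem.List.count (PySem.List.slice l none (some p.1)) p.2 : Int) < k)) := by
      intro p hp
      obtain ⟨i, hi, rfl⟩ := (PySem.List.mem_enumerate_iff _ _ _).1 hp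
      have h0 : (0:Int) + (i:Int) = (i:Int) := by ring
      rw [h0, PySem.List.slice_to _ (by positivity), PySem.List.slice_to _ (by positivity)]
      rw [Int.toNat_natCast, List.take_append_of_le_length (le_of_lt hi)]
    have hslice : PySem.List.slice (l ++ [x]) none (some ((0:Int) + (l.length:Int))) = l := by
      have : ((0:Int) + (l.length:Int)) = ((l.length : Nat) : Int) := by ring
      rw [this, PySem.List.slice_to_natCast]; simp
    rw [List.filter_append, List.filter_append, List.filter_congr hcongr,
      List.map_append, List.map_append, List.take_append, ih]
    congr 1
    have hlen : (((PySem.List.enumerate l 0).filter (fun p => p.2 == v)).map (·.1)).length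
        = l.count v := by
      rw [List.length_map, ← List.countP_eq_length_filter]
      have h1 : l.count v = ((PySem.List.enumerate l 0).map (·.2)).count v := by
        rw [PySem.List.map_snd_enumerate]
      rw [h1, List.count_eq_countP, List.countP_map]
      rfl
    simp only [PySem.List.enumerate_nil, PySem.List.enumerate_cons, List.filter_cons,
      List.filter_nil, hslice, hlen]
    by_cases hxv : x = v
    · subst hxv
      have hco : PySem.List.count l x = l.count x := rfl
      by_cases hcnt : (l.count x : Int) < k
      · have hd : (x == x && decide ((PySem.List.count l x : Int) < k)) = true := by
          simp [hcnt]
        rw [hd]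
        have hne : (1:Nat) ≤ k.toNat - l.count x := by omega
        simp [List.take_of_length_le, hne]
      · have hd : (x == x && decide ((PySem.List.count l x : Int) < k)) = false := by
          simp only [hco]; simp; omega
        rw [hd]
        have hz : k.toNat - l.count x = 0 := by omega
        simp [hz]
    · simp [hxv]

-- Grouping by a nodup cover of the values is a permutation of the original list.
theorem pv_perm_buckets {α : Type} (keys : List Int) (L : List (α × Int))
    (hnd : keys.Nodup) (hmem : ∀ p ∈ L, p.2 ∈ keys) :
    (keys.flatMap (fun v => L.filter (fun p => p.2 == v))).Perm L := by
  induction keys generalizing L with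
  | nil =>
    have : L = [] := by
      cases L with
      | nil => rfl
      | cons a t => exact absurd (hmem a (by simp)) (by simp)
    simp [this]
  | cons v ks ih =>
    have hvk : v ∉ ks := (List.nodup_cons.1 hnd).1
    have hndks : ks.Nodup := (List.nodup_cons.1 hnd).2
    rw [List.flatMap_cons]
    have htail : ks.flatMap (fun v' => L.filter (fun p => p.2 == v'))
        = ks.flatMap (fun v' => (L.filter (fun p => !(p.2 == v))).filter (fun p => p.2 == v')) := by
      apply List.flatMap_congr
      intro v' hv'
      rw [List.filter_filter]
      apply List.filter_congr
      intro p _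
      by_cases h : p.2 = v'
      · have hne : ¬ v' = v := fun hc => hvk (hc ▸ hv')
        simp [h, hne]
      · simp [h]
    rw [htail]
    have hperm := ih (L.filter (fun p => !(p.2 == v))) hndks (by
      intro p hp
      have h1 := List.of_mem_filter hp
      have h2 := hmem p (List.mem_of_mem_filter hp)
      simp at h1
      rcases List.mem_cons.1 h2 with h | h
      · exact absurd h h1
      · exact h)
    exact (List.Perm.append_left _ hperm).trans (List.filter_append_perm _ L)

theorem pv_main (items : List Int) (k : Int) :
    remove_after_kth items k = remove_after_kth_alt items k := by
  unfold remove_after_kth remove_after_kth_alt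
  by_cases hk0 : k = 0
  · simp [hk0]
  rcases lt_trichotomy k 0 with hk | hk | hk
  · -- k < 0: A's filter is empty, B returns [] by its guard
    rw [if_neg hk0, if_pos (le_of_lt hk), pv_fold_inv k items]
    have hfalse : ∀ p ∈ PySem.List.enumerate items 0,
        (decide ((PySem.List.count (PySem.List.slice items none (some p.1)) p.2 : Int) < k)) = false := by
      intro p _
      simp
      omega
    rw [List.filter_congr hfalse]
    simp
  · exact absurd hk hk0
  · -- k > 0: grouped-sorted-readback equals the prefix-count filter
    rw [if_neg hk0, if_neg (by omega), pv_fold_inv k items]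
    set Q : Int × Int → Bool :=
      fun p => decide ((PySem.List.count (PySem.List.slice items none (some p.1)) p.2 : Int) < k) with hQ
    set E := PySem.List.enumerate items 0 with hE
    show (E.filter Q).map (·.2) =
      (PySem.List.sorted
        (((E.foldl (fun (d : PySem.Dict Int (List Int)) p => d.modify p.2 [] (· ++ [p.1]))
            PySem.Dict.empty).values).flatMap
          (fun idxs => PySem.List.slice idxs none (some k)))
        (fun i => i) false).map (fun i => (PySem.List.pyGet? items i).getD 0)
    have hvals : ((E.foldl (fun (d : PySem.Dict Int (List Int)) p => d.modify p.2 [] (· ++ [p.1]))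
        PySem.Dict.empty).values)
        = (PySem.Set.ofList items).map (fun v =>
            ((E.filter (fun p => p.2 == v)).map (·.1))) := by
      rw [PySem.Dict.values_eq_map_keys _ (pv_nodup_keys items) []]
      rw [pv_keys items]
      apply List.map_congr_left
      intro v _
      exact pv_bucket items v
    rw [hvals]
    have hflat : ((PySem.Set.ofList items).map (fun v =>
          ((E.filter (fun p => p.2 == v)).map (·.1)))).flatMap
            (fun idxs => PySem.List.slice idxs none (some k))
        = ((PySem.Set.ofList items).flatMap (fun v => (E.filter Q).filter (fun p => p.2 == v))).map (·.1) := by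
      rw [List.flatMap_map]
      rw [List.map_flatMap]
      apply List.flatMap_congr
      intro v _
      rw [PySem.List.slice_to _ (le_of_lt hk), pv_take k hk v items,
        List.filter_filter]
    rw [hflat]
    -- sorting the permuted index list gives back the increasing filtered index list
    have hperm : (((PySem.Set.ofList items).flatMap (fun v => (E.filter Q).filter (fun p => p.2 == v))).map (·.1)).Perm
        ((E.filter Q).map (·.1)) := by
      apply List.Perm.map
      apply pv_perm_buckets _ _ (PySem.Set.nodup_ofList items)
      intro p hp
      have hpE : p ∈ E := List.mem_of_mem_filter hp
      obtain ⟨i, hi, rfl⟩ := (PySem.List.mem_enumerate_iff _ _ _).1 hpE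
      exact (PySem.Set.mem_ofList _ _).2 (by simp)
    have hpw : ((E.filter Q).map (·.1)).Pairwise (fun a b => a < b) := by
      rw [List.pairwise_map]
      exact (PySem.List.pairwise_lt_enumerate items 0).filter Q
    have hsorted : PySem.List.sorted
        (((PySem.Set.ofList items).flatMap (fun v => (E.filter Q).filter (fun p => p.2 == v))).map (·.1))
        (fun i => i) false = ((E.filter Q).map (·.1)) :=
      PySem.List.sorted_eq_of_perm_of_pairwise_lt _ _ (fun i => i) hperm.symm hpw
    rw [hsorted]
    -- reading the positions back: items[p.1] = p.2
    rw [List.map_map]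
    symm
    apply List.map_congr_left
    intro p hp
    have hpE : p ∈ E := List.mem_of_mem_filter hp
    obtain ⟨i, hi, rfl⟩ := (PySem.List.mem_enumerate_iff _ _ _).1 hpE
    simp [hi]

-- ===== VERDICT (by name: the statement is the Claim_ definition above) =====
theorem remove_after_kth_spec : Claim_equal_remove_after_kth := by
  intro items k _
  exact pv_main items k
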